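-- pv_equiv track=rewrite | github.com/VertigoRay/Roku | youtube-play-searched-video.py | youtube_search_character
-- ===== SOURCE A (Python) =====
-- youtube_search_alpha = [
--     ['A','B','C','D','E','F','G','{backspace}'],
--     ['H','I','J','K','L','M','N','{num}'],
--     ['O','P','Q','R','S','T','U'],
--     ['V','W','X','Y','Z','-',"'"],
--     [' ','{clear}','{search}'],
-- ]
--
-- youtube_search_num = [
--     ['1','2','3','&','#','(',')','{backspace}'],
--     ['4','5','6','@','!','?',':','{alpha}'],
--     ['7','8','9','0','.','_','"'],
--     [' ','{clear}','{search}'],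
-- ]
--
-- def youtube_search_character(char):
--     loc = next(((i, alpha.index(char))
--         for i, alpha in enumerate(youtube_search_alpha)
--         if char in alpha),
--         None)
--
--     if loc is None:
--         loc = next(((i, num.index(char))
--             for i, num in enumerate(youtube_search_num)
--             if char in num),
--             None)
--
--         if loc is not None:
--             loc = loc + youtube_search_character('{num}')
--
--     return loc
-- ===== SOURCE B (Python) =====
-- youtube_search_alpha = [
--     ['A','B','C','D','E','F','G','{backspace}'],
--     ['H','I','J','K','L','M','N','{num}'],
--     ['O','P','Q','R','S','T','U'],
--     ['V','W','X','Y','Z','-',"'"],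
--     [' ','{clear}','{search}'],
-- ]
--
-- youtube_search_num = [
--     ['1','2','3','&','#','(',')','{backspace}'],
--     ['4','5','6','@','!','?',':','{alpha}'],
--     ['7','8','9','0','.','_','"'],
--     [' ','{clear}','{search}'],
-- ]
--
-- # Precomputed table: num-grid entries first (suffixed with (1, 7), the location of
-- # '{num}' on the alpha grid), then alpha-grid entries, which overwrite shared keys
-- # so the alpha location wins for characters present on both keyboards.
-- _YOUTUBE_SEARCH_LOC = {}
-- for _i, _row in enumerate(youtube_search_num):
--     for _j, _c in enumerate(_row):
--         _YOUTUBE_SEARCH_LOC[_c] = (_i, _j, 1, 7)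
-- for _i, _row in enumerate(youtube_search_alpha):
--     for _j, _c in enumerate(_row):
--         _YOUTUBE_SEARCH_LOC[_c] = (_i, _j)
--
-- def youtube_search_character(char):
--     return _YOUTUBE_SEARCH_LOC.get(char)
-- ===== Notes on version B (the rewrite author's own statement) =====
-- stated objective: simpler
-- what changed: Replaces the two nested enumerate/index grid scans and the recursive '{num}' call with a module-level dict precomputed once from both grids (num entries stored as (i,j,1,7), alpha entries overwriting shared keys), so the function body is a single dict lookup.
import Mathlib
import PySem

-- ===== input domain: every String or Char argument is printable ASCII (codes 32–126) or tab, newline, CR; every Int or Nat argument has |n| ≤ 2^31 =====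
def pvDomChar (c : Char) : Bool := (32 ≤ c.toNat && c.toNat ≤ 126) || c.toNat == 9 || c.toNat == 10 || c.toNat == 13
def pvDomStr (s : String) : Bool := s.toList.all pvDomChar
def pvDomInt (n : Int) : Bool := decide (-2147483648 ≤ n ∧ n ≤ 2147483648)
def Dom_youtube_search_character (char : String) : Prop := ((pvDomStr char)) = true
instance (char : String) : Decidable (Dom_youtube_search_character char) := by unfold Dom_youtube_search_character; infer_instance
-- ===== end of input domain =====

-- B replaces A's two nested row scans and recursive '{num}' call by one lookup in a
-- dict precomputed from the two grids (num entries first, alpha entries overwriting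
-- shared keys): objective = simpler.

-- ===== PORT A =====
def youtube_search_alpha : List (List String) :=
  [["A","B","C","D","E","F","G","{backspace}"],
   ["H","I","J","K","L","M","N","{num}"],
   ["O","P","Q","R","S","T","U"],
   ["V","W","X","Y","Z","-","'"],
   [" ","{clear}","{search}"]]

def youtube_search_num : List (List String) :=
  [["1","2","3","&","#","(",")","{backspace}"],
   ["4","5","6","@","!","?",":","{alpha}"],
   ["7","8","9","0",".","_","\""],
   [" ","{clear}","{search}"]]

-- next(((i, row.index(char)) for i, row in enumerate(rows) if char in row), None):
-- first row (with its index i, starting at start) containing char.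
-- row.index raises only if char ∉ row, which the guard excludes; .getD 0 is exact here.
def pvGridLoc (char : String) (rows : List (List String)) (i : Int) : Option (List Int) :=
  match rows with
  | [] => none
  | r :: rest =>
    if char ∈ r then some [i, ((PySem.List.index? r char).getD 0 : Nat)]
    else pvGridLoc char rest (i + 1)

def youtube_search_character (char : String) : Option (List Int) :=
  match pvGridLoc char youtube_search_alpha 0 with
  | some loc => some loc
  | none =>
    match pvGridLoc char youtube_search_num 0 with
    | none => none
    | some loc =>
      -- Python's recursive call youtube_search_character('{num}'): "{num}" is on the
      -- alpha grid, so that call returns its alpha-grid location immediately; the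
      -- depth-1 recursion is inlined here as that alpha lookup (exact).
      match pvGridLoc "{num}" youtube_search_alpha 0 with
      | some l2 => some (loc ++ l2)
      | none => none  -- unreachable ("{num}" ∈ alpha grid); Python would raise TypeError

-- ===== PORT B =====
-- the module-level table: num-grid entries (i, j, 1, 7) first, then alpha-grid
-- entries (i, j), overwriting shared keys
def pvSearchTable : PySem.Dict String (List Int) :=
  let d :=
    (PySem.List.enumerate youtube_search_num).foldl
      (fun d p =>
        (PySem.List.enumerate p.2).foldl
          (fun d q => d.insert q.2 [p.1, q.1, 1, 7]) d)
      PySem.Dict.empty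
  (PySem.List.enumerate youtube_search_alpha).foldl
    (fun d p =>
      (PySem.List.enumerate p.2).foldl
        (fun d q => d.insert q.2 [p.1, q.1]) d)
    d

def youtube_search_character_alt (char : String) : Option (List Int) :=
  pvSearchTable.get? char

-- ===== PRECONDITION & SPEC =====
def Spec_youtube_search_character (char : String) (out : Option (List Int)) : Prop := out = youtube_search_character_alt char
instance (char : String) (out : Option (List Int)) : Decidable (Spec_youtube_search_character char out) := by unfold Spec_youtube_search_character; infer_instance

-- ===== CLAIM (what is proved, stated in full; the proofs are below) =====
def Claim_equal_youtube_search_character : Prop := ∀ (char : String), Dom_youtube_search_character char → Spec_youtube_search_character char (youtube_search_character char)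

-- ===== LEMMAS AND PROOFS =====

-- all keys of the table (= all characters on either grid), in insertion order
def pvAllKeys : List String :=
  ["1", "2", "3", "&", "#", "(", ")", "{backspace}", "4", "5", "6", "@", "!", "?", ":",
   "{alpha}", "7", "8", "9", "0", ".", "_", "\"", " ", "{clear}", "{search}",
   "A", "B", "C", "D", "E", "F", "G", "H", "I", "J", "K", "L", "M", "N", "{num}",
   "O", "P", "Q", "R", "S", "T", "U", "V", "W", "X", "Y", "Z", "-", "'"]

set_option maxRecDepth 10000 in
set_option maxHeartbeats 2000000 in
theorem pv_on_keys : ∀ c ∈ pvAllKeys,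
    youtube_search_character c = youtube_search_character_alt c := by decide

set_option maxRecDepth 10000 in
set_option maxHeartbeats 2000000 in
theorem pv_table_keys : pvSearchTable.keys = pvAllKeys := by decide

-- every character appearing on either grid is in pvAllKeys
set_option maxRecDepth 10000 in
theorem pv_alpha_sub : ∀ r ∈ youtube_search_alpha, ∀ c ∈ r, c ∈ pvAllKeys := by decide

set_option maxRecDepth 10000 in
theorem pv_num_sub : ∀ r ∈ youtube_search_num, ∀ c ∈ r, c ∈ pvAllKeys := by decide

theorem pv_gridLoc_none (char : String) (rows : List (List String)) (i : Int)
    (h : ∀ r ∈ rows, char ∉ r) : pvGridLoc char rows i = none := by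
  induction rows generalizing i with
  | nil => rfl
  | cons r rest ih =>
    simp only [pvGridLoc]
    rw [if_neg (h r (by simp))]
    exact ih _ (fun r' hr' => h r' (by simp [hr']))

-- ===== VERDICT (by name: the statement is the Claim_ definition above) =====
set_option maxRecDepth 10000 in
theorem youtube_search_character_spec : Claim_equal_youtube_search_character := by
  intro char _
  unfold Spec_youtube_search_character
  by_cases hk : char ∈ pvAllKeys
  · exact pv_on_keys char hk
  · have ha : pvGridLoc char youtube_search_alpha 0 = none :=
      pv_gridLoc_none _ _ _ (fun r hr hc => hk (pv_alpha_sub r hr char hc))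
    have hn : pvGridLoc char youtube_search_num 0 = none :=
      pv_gridLoc_none _ _ _ (fun r hr hc => hk (pv_num_sub r hr char hc))
    have hb : youtube_search_character_alt char = none := by
      unfold youtube_search_character_alt
      rw [PySem.Dict.get?_eq_none_iff_not_mem_keys, pv_table_keys]
      exact hk
    rw [youtube_search_character, ha, hn, hb]
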